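-- pv_equiv track=rewrite | github.com/sammwaughh/Project-Eulers | problem-61.py | hexagonals_under_m
-- ===== SOURCE A (Python) =====
-- def hexagonals_under_m(m):
--     i = 1
--     is_hexagonal = [False] * m
--     t = 1
--     while t < m:
--         is_hexagonal[t] = True
--         i += 4
--         t += i
--     return is_hexagonal
-- ===== SOURCE B (Python) =====
-- def hexagonals_under_m(m):
--     hexes = set()
--     n = 1
--     while n * (2 * n - 1) < m:
--         hexes.add(n * (2 * n - 1))
--         n += 1
--     return [i in hexes for i in range(m)]
-- ===== Notes on version B (the rewrite author's own statement) =====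
-- stated objective: alternative
-- what changed: Replaces A's single in-place marking pass driven by a second-difference recurrence (accumulators i, t with i += 4, t += i) by two staged passes: first collect the hexagonal numbers below m into a set via the closed form n*(2n-1), then build the output list by a set-membership test over range(m).
import Mathlib
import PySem

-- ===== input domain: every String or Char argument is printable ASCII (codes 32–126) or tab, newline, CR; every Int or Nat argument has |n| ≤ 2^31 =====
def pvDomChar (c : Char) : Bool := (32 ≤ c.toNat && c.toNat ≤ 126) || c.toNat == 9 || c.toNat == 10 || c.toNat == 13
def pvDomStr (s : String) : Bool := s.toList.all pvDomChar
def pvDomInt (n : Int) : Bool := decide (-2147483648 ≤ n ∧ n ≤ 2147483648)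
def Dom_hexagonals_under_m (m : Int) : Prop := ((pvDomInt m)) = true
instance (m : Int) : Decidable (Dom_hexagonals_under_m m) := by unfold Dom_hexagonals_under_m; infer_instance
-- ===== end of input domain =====

-- B replaces A's in-place marking pass (accumulators i += 4, t += i) by two staged passes:
-- collect the hexagonal numbers n*(2n-1) < m, then build the list by membership over range(m).

-- ===== PORT A =====
-- A's while loop as fuel recursion; t is always ≥ 1 and < m = length, so `lst.set t.toNat` is
-- exact for Python's `is_hexagonal[t] = True`; fuel (m-1).toNat bounds the iteration count (t grows by ≥ 5).
def pvLoopA (fuel : Nat) (m i t : Int) (lst : List Bool) : List Bool :=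
  match fuel with
  | 0 => lst
  | fuel + 1 =>
    if t < m then pvLoopA fuel m (i + 4) (t + (i + 4)) (lst.set t.toNat true) else lst

def hexagonals_under_m (m : Int) : List Bool :=
  pvLoopA (m - 1).toNat m 1 1 (List.replicate m.toNat false)

-- ===== PORT B =====
-- B's collecting while loop over the Python set `hexes` (PySem.Set, built with Set.add);
-- fuel (m-1).toNat bounds the iterations as in A.
def pvCollect (fuel : Nat) (m n : Int) (hexes : PySem.Set Int) : PySem.Set Int :=
  match fuel with
  | 0 => hexes
  | fuel + 1 =>
    let h := n * (2 * n - 1)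
    if h < m then pvCollect fuel m (n + 1) (PySem.Set.add hexes h) else hexes

def hexagonals_under_m_alt (m : Int) : List Bool :=
  let hexes := pvCollect (m - 1).toNat m 1 PySem.Set.empty
  (PySem.List.pyRange 0 m 1).map (fun i => PySem.Set.contains hexes i)

-- ===== PRECONDITION & SPEC =====
def Spec_hexagonals_under_m (m : Int) (out : List Bool) : Prop := out = hexagonals_under_m_alt m
instance (m : Int) (out : List Bool) : Decidable (Spec_hexagonals_under_m m out) := by unfold Spec_hexagonals_under_m; infer_instance

-- ===== CLAIM (what is proved, stated in full; the proofs are below) =====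
def Claim_equal_hexagonals_under_m : Prop := ∀ (m : Int), Dom_hexagonals_under_m m → Spec_hexagonals_under_m m (hexagonals_under_m m)

-- ===== LEMMAS AND PROOFS =====

-- Proof-side pure-list form of B's collected set (the hexagonal numbers are strictly
-- increasing, so Set.add always appends; pvHexes names the appended suffix).
def pvHexes (fuel : Nat) (m n : Int) : List Int :=
  match fuel with
  | 0 => []
  | fuel + 1 =>
    let h := n * (2 * n - 1)
    if h < m then h :: pvHexes fuel m (n + 1) else []

theorem pvCollect_eq_append (fuel : Nat) : ∀ (m n : Int) (s : PySem.Set Int), 1 ≤ n →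
    (∀ x ∈ s, x < n * (2 * n - 1)) →
    pvCollect fuel m n s = s ++ pvHexes fuel m n := by
  induction fuel with
  | zero => intro m n s _ _; simp [pvCollect, pvHexes]
  | succ fuel ih =>
    intro m n s hn hs
    simp only [pvCollect, pvHexes]
    split
    · have hnot : n * (2 * n - 1) ∉ s := fun hmem => absurd (hs _ hmem) (by omega)
      have hadd : PySem.Set.add s (n * (2 * n - 1)) = s ++ [n * (2 * n - 1)] := by
        simp [PySem.Set.add, hnot]
      rw [hadd, ih m (n + 1) _ (by omega)]
      · simp
      · intro x hx
        rcases List.mem_append.mp hx with hx | hx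
        · have := hs x hx; nlinarith
        · simp at hx; subst hx; nlinarith
    · simp


-- A's loop, started at the state after n-1 marks (i = 4n-3, t = n*(2n-1)), is the fold that
-- sets exactly the positions B collects.
theorem pvLoopA_eq_foldl (fuel : Nat) (m : Int) : ∀ (n : Int) (lst : List Bool),
    pvLoopA fuel m (4 * n - 3) (n * (2 * n - 1)) lst =
      (pvHexes fuel m n).foldl (fun l h => l.set h.toNat true) lst := by
  induction fuel with
  | zero => intro n lst; rfl
  | succ fuel ih =>
    intro n lst
    simp only [pvLoopA, pvHexes]
    split
    · have e2 : 4 * n - 3 + 4 = 4 * (n + 1) - 3 := by ring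
      have e1 : n * (2 * n - 1) + (4 * n - 3 + 4) = (n + 1) * (2 * (n + 1) - 1) := by ring
      rw [e2] at e1 ⊢
      rw [e1, ih (n + 1)]
      rfl
    · rfl

theorem pvHexes_nonneg (fuel : Nat) : ∀ (m n : Int), 1 ≤ n →
    ∀ h ∈ pvHexes fuel m n, 0 ≤ h := by
  induction fuel with
  | zero => intro m n _ h hh; simp [pvHexes] at hh
  | succ fuel ih =>
    intro m n hn h hh
    simp only [pvHexes] at hh
    split at hh
    · rcases List.mem_cons.mp hh with rfl | hh
      · nlinarith
      · exact ih m (n + 1) (by omega) h hh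
    · simp at hh

theorem foldl_set_length (hs : List Int) : ∀ (lst : List Bool),
    (hs.foldl (fun l h => l.set h.toNat true) lst).length = lst.length := by
  induction hs with
  | nil => intro lst; rfl
  | cons h rest ih => intro lst; simpa [List.foldl] using (ih (lst.set h.toNat true)).trans (by simp)

theorem foldl_set_getElem (hs : List Int) (hpos : ∀ h ∈ hs, 0 ≤ h) :
    ∀ (lst : List Bool) (j : Nat) (hj : j < lst.length),
      (hs.foldl (fun l h => l.set h.toNat true) lst)[j]'(by rw [foldl_set_length]; exact hj) =
        (lst[j] || hs.contains ((j : Nat) : Int)) := by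
  induction hs with
  | nil => intro lst j hj; simp
  | cons h rest ih =>
    intro lst j hj
    have hpos' : ∀ x ∈ rest, 0 ≤ x := fun x hx => hpos x (List.mem_cons_of_mem _ hx)
    have h0 : 0 ≤ h := hpos h List.mem_cons_self
    have := ih hpos' (lst.set h.toNat true) j (by simpa using hj)
    simp only [List.foldl] at *
    rw [this]
    by_cases hc : h.toNat = j
    · have : h = (j : Int) := by omega
      subst this
      simp [hc]
    · have hne : h ≠ (j : Int) := by omega
      simp [hc, Ne.symm hne]

-- ===== VERDICT (by name: the statement is the Claim_ definition above) =====
theorem hexagonals_under_m_spec : Claim_equal_hexagonals_under_m := by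
  intro m _
  show hexagonals_under_m m = hexagonals_under_m_alt m
  unfold hexagonals_under_m hexagonals_under_m_alt
  rw [pvCollect_eq_append (m - 1).toNat m 1 PySem.Set.empty (by omega)
        (by intro x hx; simp [PySem.Set.empty] at hx)]
  have h1 : pvLoopA (m - 1).toNat m 1 1 (List.replicate m.toNat false) =
      (pvHexes (m - 1).toNat m 1).foldl (fun l h => l.set h.toNat true)
        (List.replicate m.toNat false) := by
    have e := pvLoopA_eq_foldl (m - 1).toNat m 1 (List.replicate m.toNat false)
    rw [show (4 * (1:Int) - 3) = 1 by norm_num, show ((1:Int) * (2 * 1 - 1)) = 1 by norm_num] at e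
    exact e
  rw [h1]
  apply List.ext_getElem
  · rw [foldl_set_length]
    simp [PySem.List.length_pyRange_one]
  · intro j hj hj2
    have hjm : j < m.toNat := by simpa using (foldl_set_length _ _ ▸ hj : j < (List.replicate m.toNat false).length)
    rw [foldl_set_getElem _ (pvHexes_nonneg _ m 1 (by omega)) _ j (by simpa using hjm)]
    have hjr : j < (PySem.List.pyRange 0 m 1).length := by
      simpa [PySem.List.length_pyRange_one] using hjm
    rw [List.getElem_map]
    rw [PySem.List.getElem_pyRange_one]
    simp
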